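-- pv_equiv track=rewrite | github.com/OktawiaMil/code_assessment | question_4_gen_ai/clinical_data_agent.py | _extract_condition_term
-- ===== SOURCE A (Python) =====
-- def _extract_condition_term(question: str) -> str:
--     """Try to find a known AE term in the question text."""
--     ae_terms = [
--         "headache", "nausea", "dizziness", "fatigue", "vomiting",
--         "diarrhoea", "pruritus", "rash", "erythema", "pain",
--         "insomnia", "cough", "pyrexia", "arthralgia", "constipation",
--         "application site pruritus", "application site erythema",
--         "application site dermatitis", "application site irritation",
--         "sinus bradycardia", "atrial fibrillation",
--     ]
--     # Longest first so multi-word terms match before single words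
--     for term in sorted(ae_terms, key=len, reverse=True):
--         if term in question:
--             return term
--     return ""
-- ===== SOURCE B (Python) =====
-- def _extract_condition_term(question: str) -> str:
--     """Try to find a known AE term in the question text."""
--     terms = (
--         "headache,nausea,dizziness,fatigue,vomiting,"
--         "diarrhoea,pruritus,rash,erythema,pain,"
--         "insomnia,cough,pyrexia,arthralgia,constipation,"
--         "application site pruritus,application site erythema,"
--         "application site dermatitis,application site irritation,"
--         "sinus bradycardia,atrial fibrillation"
--     ).split(",")
--     # One pass, no sort: keep the longest match seen so far; the strict '>'
--     # means equal-length ties keep the earlier term, like A's stable sort.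
--     best = ""
--     for t in terms:
--         if len(t) > len(best) and t in question:
--             best = t
--     return best
-- ===== Notes on version B (the rewrite author's own statement) =====
-- stated objective: simpler
-- what changed: B replaces A's sort-then-return-first-match (stable length-descending sort, then a scan returning the first term contained in the question) with a single running-best pass over the comma-joined term string split once: it keeps the longest match seen so far, and a strictly-longer test keeps the earlier term on equal-length ties exactly like A's stable sort.
import Mathlib
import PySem

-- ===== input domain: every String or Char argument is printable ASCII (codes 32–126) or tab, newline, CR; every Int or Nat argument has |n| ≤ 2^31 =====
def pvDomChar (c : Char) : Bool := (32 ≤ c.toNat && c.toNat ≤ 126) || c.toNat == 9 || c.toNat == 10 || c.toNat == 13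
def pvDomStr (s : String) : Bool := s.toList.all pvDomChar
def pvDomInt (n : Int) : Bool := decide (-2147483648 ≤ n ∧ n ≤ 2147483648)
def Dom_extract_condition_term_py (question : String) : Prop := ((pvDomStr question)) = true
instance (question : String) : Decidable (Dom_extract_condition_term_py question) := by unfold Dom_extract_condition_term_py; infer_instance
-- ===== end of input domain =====

-- B replaces A's sort-then-first-match with a single running-best pass (no sort):
-- objective simpler; strictly-longer test keeps the earlier term on equal-length ties, matching A's stable sort.

-- ===== PORT A =====
def aeTermsA : List String :=
  ["headache", "nausea", "dizziness", "fatigue", "vomiting",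
   "diarrhoea", "pruritus", "rash", "erythema", "pain",
   "insomnia", "cough", "pyrexia", "arthralgia", "constipation",
   "application site pruritus", "application site erythema",
   "application site dermatitis", "application site irritation",
   "sinus bradycardia", "atrial fibrillation"]

-- the 'for term in …: if term in question: return term' loop, then 'return ""'
def aeLoopA (question : String) : List String → String
  | [] => ""
  | t :: ts => if PySem.Str.isIn t question then t else aeLoopA question ts

def extract_condition_term_py (question : String) : String :=
  aeLoopA question (PySem.List.sorted aeTermsA (fun t => PySem.Str.len t) true)

-- ===== PORT B =====
-- Source B's comma-joined term string and its '.split(",")' (sep is the nonempty literal ",",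
-- so Python's split always returns; split? is some here and getD [] is never taken)
def aeCsvB : String :=
  "headache,nausea,dizziness,fatigue,vomiting,diarrhoea,pruritus,rash,erythema,pain,insomnia,cough,pyrexia,arthralgia,constipation,application site pruritus,application site erythema,application site dermatitis,application site irritation,sinus bradycardia,atrial fibrillation"

def aeTermsB : List String := (PySem.Str.split? aeCsvB ",").getD []

-- the 'best = ""; for t in terms: if len(t) > len(best) and t in question: best = t' loop
def extract_condition_term_py_alt (question : String) : String :=
  aeTermsB.foldl
    (fun best t =>
      if PySem.Str.len best < PySem.Str.len t && PySem.Str.isIn t question then t else best)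
    ""

-- ===== PRECONDITION & SPEC =====
def Spec_extract_condition_term_py (question : String) (out : String) : Prop := out = extract_condition_term_py_alt question
instance (question : String) (out : String) : Decidable (Spec_extract_condition_term_py question out) := by unfold Spec_extract_condition_term_py; infer_instance

-- ===== CLAIM (what is proved, stated in full; the proofs are below) =====
def Claim_equal_extract_condition_term_py : Prop := ∀ (question : String), Dom_extract_condition_term_py question → Spec_extract_condition_term_py question (extract_condition_term_py question)

-- ===== LEMMAS AND PROOFS =====

-- inserting a non-match does not change the first match
theorem find?_insertBy_of_neg {α : Type} (key : α → Int) (p : α → Bool) (x : α)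
    (S : List α) (hx : p x = false) :
    List.find? p (PySem.List.insertBy (fun a b => decide (key b < key a)) x S)
      = List.find? p S := by
  induction S with
  | nil => simp [PySem.List.insertBy, List.find?, hx]
  | cons y ys ih =>
      simp only [PySem.List.insertBy]
      split
      · simp [List.find?, hx]
      · cases hy : p y <;> simp [List.find?, hy, ih]

-- inserting a match x into a length-descending list: the first match becomes x
-- exactly when every earlier match is strictly shorter
theorem find?_insertBy_of_pos {α : Type} (key : α → Int) (p : α → Bool) (x : α)
    (S : List α) (hx : p x = true)
    (hs : S.Pairwise (fun a b => key b ≤ key a)) :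
    List.find? p (PySem.List.insertBy (fun a b => decide (key b < key a)) x S)
      = match List.find? p S with
        | none => some x
        | some m => if key m < key x then some x else some m := by
  induction S with
  | nil => simp [PySem.List.insertBy, List.find?, hx]
  | cons y ys ih =>
      rcases List.pairwise_cons.mp hs with ⟨hy_ge, hys⟩
      simp only [PySem.List.insertBy]
      split
      · rename_i hlt
        have hyx : key y < key x := of_decide_eq_true hlt
        cases hpy : p y with
        | true => simp [List.find?, hx, hpy, hyx]
        | false =>
            simp only [List.find?, hx, hpy]
            cases hm : List.find? p ys with
            | none => rfl
            | some m =>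
                have hmem : m ∈ ys := List.mem_of_find?_eq_some hm
                have : key m < key x := lt_of_le_of_lt (hy_ge m hmem) hyx
                simp [this]
      · rename_i hnlt
        have hxy : ¬ key y < key x := by simpa using hnlt
        cases hpy : p y with
        | true =>
            simp [List.find?, hpy, hxy]
        | false =>
            simp only [List.find?, hpy]
            exact ih hys

-- first match of the stable descending length-sort = left-biased max-by-length of the matches
theorem find?_sorted_eq_max?_filter {α : Type} (key : α → Int) (p : α → Bool)
    (L : List α) :
    List.find? p (PySem.List.sorted L key true)
      = PySem.List.max? (L.filter p) key := by
  induction L using List.reverseRecOn with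
  | nil => simp [PySem.List.sorted, PySem.List.max?]
  | append_singleton L x ih =>
      have hsorted : PySem.List.sorted (L ++ [x]) key true
          = PySem.List.insertBy (fun a b => decide (key b < key a)) x
              (PySem.List.sorted L key true) := by
        simp [PySem.List.sorted, List.foldl_append]
      have hpair : (PySem.List.sorted L key true).Pairwise (fun a b => key b ≤ key a) :=
        PySem.List.sorted_pairwise_rev L key
      rw [hsorted]
      cases hx : p x with
      | false =>
          rw [find?_insertBy_of_neg key p x _ hx, ih]
          simp [hx, List.filter_append]
      | true =>
          rw [find?_insertBy_of_pos key p x _ hx hpair, ih]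
          simp only [List.filter_append, List.filter_cons, hx, List.filter_nil,
            PySem.List.max?, List.foldl_append, if_true, List.foldl_cons, List.foldl_nil]
          cases List.foldl
              (fun acc y =>
                match acc with
                | none => some y
                | some m => if key m < key y then some y else some m)
              none (List.filter p L) <;> rfl

-- A's loop is find?-with-default
theorem aeLoopA_eq_find? (question : String) (l : List String) :
    aeLoopA question l
      = (List.find? (fun t => PySem.Str.isIn t question) l).getD "" := by
  induction l with
  | nil => rfl
  | cons t ts ih =>
      simp only [aeLoopA, List.find?, PySem.Str.isIn, ih]
      cases PySem.Chars.isIn t.toList question.toList <;> simp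

-- the max?-fold (proof helper; mirrors PySem.List.max?'s foldl step)
def fmax {α : Type} (key : α → Int) : Option α → α → Option α
  | none, y => some y
  | some m, y => if key m < key y then some y else some m

theorem max?_eq_foldl_fmax {α : Type} (key : α → Int) (xs : List α) :
    PySem.List.max? xs key = List.foldl (fmax key) none xs := by
  unfold PySem.List.max?
  congr 1
  funext acc y
  cases acc <;> rfl

-- the max?-fold with a 'some' seed, in terms of the none-seeded fold
theorem maxFold_some_seed {α : Type} (key : α → Int) (rest : List α) :
    ∀ x : α,
    List.foldl (fmax key) (some x) rest
      = match List.foldl (fmax key) none rest with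
        | none => some x
        | some m => if key x < key m then some m else some x := by
  induction rest with
  | nil => intro x; rfl
  | cons y ys ih =>
      intro x
      simp only [List.foldl_cons, fmax]
      by_cases hxy : key x < key y
      · rw [if_pos hxy, ih y]
        cases hM : List.foldl (fmax key) none ys with
        | none => simp [hxy]
        | some m =>
            by_cases hym : key y < key m
            · have hxm : key x < key m := hxy.trans hym
              simp [hym, hxm]
            · simp [hym, hxy]
      · rw [if_neg hxy, ih x, ih y]
        cases hM : List.foldl (fmax key) none ys with
        | none => simp [hxy]
        | some m =>
            by_cases hym : key y < key m
            · simp [hym]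
            · have hxm : ¬ key x < key m := by omega
              simp [hym, hxy, hxm]

-- peel one element off max?
theorem max?_cons {α : Type} (key : α → Int) (t : α) (rest : List α) :
    PySem.List.max? (t :: rest) key
      = match PySem.List.max? rest key with
        | none => some t
        | some m => if key t < key m then some m else some t := by
  rw [max?_eq_foldl_fmax, max?_eq_foldl_fmax]
  simp only [List.foldl_cons]
  exact maxFold_some_seed key rest t

-- B's running-best fold = left-biased max?-by-key of the matches, seeded with b
theorem foldl_best_eq_max? {α : Type} (key : α → Int) (p : α → Bool) (L : List α) :
    ∀ b : α,
    List.foldl (fun best t => if key best < key t && p t then t else best) b L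
      = match PySem.List.max? (L.filter p) key with
        | none => b
        | some m => if key b < key m then m else b := by
  induction L with
  | nil => intro b; rfl
  | cons t ts ih =>
      intro b
      simp only [List.foldl_cons, List.filter_cons]
      cases hpt : p t with
      | false =>
          simp only [Bool.and_false, Bool.false_eq_true, if_false]
          simpa using ih b
      | true =>
          simp only [Bool.and_true, decide_eq_true_eq, reduceIte]
          rw [max?_cons]
          by_cases hbt : key b < key t
          · rw [if_pos hbt, ih t]
            cases hm : PySem.List.max? (List.filter p ts) key with
            | none => simp [hbt]
            | some m =>
                by_cases htm : key t < key m
                · have hbm : key b < key m := hbt.trans htm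
                  simp [htm, hbm]
                · simp [htm, hbt]
          · rw [if_neg hbt, ih b]
            cases hm : PySem.List.max? (List.filter p ts) key with
            | none => simp [hbt]
            | some m =>
                by_cases htm : key t < key m
                · simp [htm]
                · have hbm : ¬ key b < key m := by omega
                  simp [htm, hbt, hbm]

-- B's term list (the split of the comma-joined string) is A's term list
set_option maxRecDepth 100000 in
theorem aeTermsB_eq_aeTermsA : aeTermsB = aeTermsA := by decide

-- every AE term is nonempty
theorem aeTermsA_len_pos : ∀ t ∈ aeTermsA, 0 < PySem.Str.len t := by decide

-- ===== VERDICT (by name: the statement is the Claim_ definition above) =====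
theorem extract_condition_term_py_spec : Claim_equal_extract_condition_term_py := by
  intro question _
  unfold Spec_extract_condition_term_py extract_condition_term_py extract_condition_term_py_alt
  rw [aeLoopA_eq_find?,
    find?_sorted_eq_max?_filter (fun t => PySem.Str.len t) (fun t => PySem.Str.isIn t question) aeTermsA,
    aeTermsB_eq_aeTermsA,
    foldl_best_eq_max? (fun t => PySem.Str.len t) (fun t => PySem.Str.isIn t question) aeTermsA ""]
  cases hm : PySem.List.max? (aeTermsA.filter (fun t => PySem.Str.isIn t question))
      (fun t => PySem.Str.len t) with
  | none => rfl
  | some m =>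
      have hmem : m ∈ aeTermsA := List.mem_of_mem_filter (PySem.List.max?_mem hm)
      have hpos : 0 < PySem.Str.len m := aeTermsA_len_pos m hmem
      have hlen0 : PySem.Str.len "" = 0 := by decide
      simp only [Option.getD_some, hlen0, hpos, if_pos]
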